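-- pv_equiv track=rewrite | github.com/ebikt/snmp-importer | snmp_importer/metrics.py | iterate_alternatives
-- ===== SOURCE A (Python) =====
-- from typing import cast, Iterator, Mapping, Self, Callable
--
-- def iterate_alternatives(choices:dict[str, tuple[str, ...]], order:list[str]) -> Iterator[dict[str, str]]: # {{{
--     if len(order) == 0:
--         yield {}
--         return
--     key = order[-1]
--     for recursion in iterate_alternatives(choices, order[:-1]):
--         for value in choices[key]:
--             ret = recursion.copy()
--             ret[key] = value
--             yield ret
-- ===== SOURCE B (Python) =====
-- from itertools import product
-- from typing import Iterator
--
-- def iterate_alternatives(choices: dict[str, tuple[str, ...]], order: list[str]) -> Iterator[dict[str, str]]: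
--     alternatives = [choices[key] for key in order]
--     for combo in product(*alternatives):
--         yield dict(zip(order, combo))
-- ===== Notes on version B (the rewrite author's own statement) =====
-- stated objective: idiomatic
-- what changed: Replaced the recursive generator (recursing on order[:-1] with a copy-and-extend of each partial dict) by a single itertools.product over the alternative tuples, building each dict once with dict(zip(order, combo)).
-- outside the precondition, e.g. on iterate_alternatives({'a': ()}, ['a', 'b']): A returns [], B raises KeyError
import Mathlib
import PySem

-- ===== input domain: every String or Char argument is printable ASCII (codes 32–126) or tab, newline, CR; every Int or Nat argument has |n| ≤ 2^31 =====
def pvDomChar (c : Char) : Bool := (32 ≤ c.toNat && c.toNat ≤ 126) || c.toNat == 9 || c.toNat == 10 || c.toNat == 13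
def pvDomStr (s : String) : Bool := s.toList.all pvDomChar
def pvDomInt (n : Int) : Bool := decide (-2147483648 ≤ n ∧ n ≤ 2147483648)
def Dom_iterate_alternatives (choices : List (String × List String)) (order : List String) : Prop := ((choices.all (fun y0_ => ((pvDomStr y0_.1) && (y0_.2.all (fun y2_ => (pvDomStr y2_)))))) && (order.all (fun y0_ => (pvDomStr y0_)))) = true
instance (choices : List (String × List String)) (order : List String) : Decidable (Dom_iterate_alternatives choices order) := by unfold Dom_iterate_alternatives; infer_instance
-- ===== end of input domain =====

-- B replaces A's recursive generator by an iterative itertools.product pass (idiomatic); equivalence is about the returned sequence of dicts.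

-- ===== PORT A =====
-- A recurses on order[:-1] and extends each partial dict with every alternative for the last key.
def iterAcore (choices : PySem.Dict String (List String)) (order : List String) :
    List (PySem.Dict String String) :=
  if h : order = [] then
    [PySem.Dict.mk []]
  else
    let key := order.getLast h
    (iterAcore choices order.dropLast).flatMap (fun recursion =>
      (choices.getD key []).map (fun value => recursion.insert key value))
termination_by order.length
decreasing_by
  simp only [List.length_dropLast]
  have := List.length_pos_of_ne_nil h
  omega

def iterate_alternatives (choices : List (String × List String)) (order : List String) : List (List (String × String)) :=
  (iterAcore (PySem.Dict.mk choices) order).map PySem.Dict.items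

-- ===== PORT B =====
-- itertools.product(*lists): last argument varies fastest.
def pyProduct : List (List String) → List (List String)
  | [] => [[]]
  | xs :: rest => xs.flatMap (fun x => (pyProduct rest).map (fun c => x :: c))

-- dict(zip(order, combo))
def dictOfZip (order : List String) (combo : List String) : PySem.Dict String String :=
  (order.zip combo).foldl (fun d p => d.insert p.1 p.2) (PySem.Dict.mk [])

def iterate_alternatives_alt (choices : List (String × List String)) (order : List String) : List (List (String × String)) :=
  let alternatives := order.map (fun k => PySem.Dict.getD (PySem.Dict.mk choices) k [])
  (pyProduct alternatives).map (fun combo => (dictOfZip order combo).items)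

-- ===== PRECONDITION & SPEC =====
-- Pre_ excludes inputs where some key of order is missing from choices: there Python A raises
-- KeyError (or, when an earlier key has an empty alternative tuple, accidentally returns an
-- empty iterator because lazy evaluation never reaches the missing key), and B raises KeyError.
def Pre_iterate_alternatives (choices : List (String × List String)) (order : List String) : Prop :=
  (order.all (fun k => choices.any (fun p => p.1 == k))) = true
instance (choices : List (String × List String)) (order : List String) : Decidable (Pre_iterate_alternatives choices order) := by unfold Pre_iterate_alternatives; infer_instance

def pvWitness_iterate_alternatives : (List (String × List String)) × List String :=
  ([("a", ["1", "2"]), ("b", ["x"])], ["a", "b"])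

def Spec_iterate_alternatives (choices : List (String × List String)) (order : List String) (out : List (List (String × String))) : Prop := out = iterate_alternatives_alt choices order
instance (choices : List (String × List String)) (order : List String) (out : List (List (String × String))) : Decidable (Spec_iterate_alternatives choices order out) := by unfold Spec_iterate_alternatives; infer_instance

-- ===== CLAIM (what is proved, stated in full; the proofs are below) =====
def Claim_equal_iterate_alternatives : Prop := ∀ (choices : List (String × List String)) (order : List String), Dom_iterate_alternatives choices order → Pre_iterate_alternatives choices order → Spec_iterate_alternatives choices order (iterate_alternatives choices order)

-- ===== LEMMAS AND PROOFS =====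

theorem pyProduct_length {ls : List (List String)} {c : List String}
    (h : c ∈ pyProduct ls) : c.length = ls.length := by
  induction ls generalizing c with
  | nil => simp [pyProduct] at h; simp [h]
  | cons xs rest ih =>
    simp only [pyProduct, List.mem_flatMap, List.mem_map] at h
    obtain ⟨x, _, c', hc', rfl⟩ := h
    simp [ih hc']

theorem pyProduct_concat (ls : List (List String)) (xs : List String) :
    pyProduct (ls ++ [xs]) = (pyProduct ls).flatMap (fun c => xs.map (fun x => c ++ [x])) := by
  induction ls with
  | nil => simp [pyProduct, ← List.map_eq_flatMap]
  | cons ys rest ih =>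
    simp [pyProduct, ih, List.flatMap_map, List.map_flatMap, List.flatMap_assoc, List.map_map,
      Function.comp_def, List.cons_append]

theorem dictOfZip_concat (order : List String) (c : List String) (k v : String)
    (hlen : c.length = order.length) :
    dictOfZip (order ++ [k]) (c ++ [v]) = (dictOfZip order c).insert k v := by
  unfold dictOfZip
  rw [List.zip_append hlen.symm, List.foldl_append]
  rfl

theorem iterAcore_eq (choices : PySem.Dict String (List String)) (order : List String) :
    iterAcore choices order =
      (pyProduct (order.map (fun k => choices.getD k []))).map (dictOfZip order) := by
  induction order using List.reverseRecOn with
  | nil => simp [iterAcore, pyProduct, dictOfZip]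
  | append_singleton l k ih =>
    rw [iterAcore, dif_neg (by simp : ¬(l ++ [k] = []))]
    simp only [List.getLast_concat, List.dropLast_concat]
    rw [ih]
    rw [List.map_append, List.map_singleton, pyProduct_concat]
    rw [List.flatMap_map, List.map_flatMap]
    apply List.flatMap_congr
    intro c hc
    rw [List.map_map]
    apply List.map_congr_left
    intro v _
    simp only [Function.comp]
    rw [dictOfZip_concat l c k v]
    exact (pyProduct_length hc).trans (by simp)

-- ===== VERDICT (by name: the statement is the Claim_ definition above) =====
theorem iterate_alternatives_spec : Claim_equal_iterate_alternatives := by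
  intro choices order _ _
  unfold Spec_iterate_alternatives iterate_alternatives iterate_alternatives_alt
  rw [iterAcore_eq, List.map_map]
  rfl
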